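-- pv_equiv track=rewrite | github.com/Meti-Adane/Competitive_Programming | 2178-maximum-split-of-positive-even-integers/2178-maximum-split-of-positive-even-integers.py | maximumEvenSplit
-- ===== SOURCE A (Python) =====
-- from typing import List
--
-- def maximumEvenSplit(finalSum: int) -> List[int]:
--     if finalSum % 2 == 1:
--         return []
--     ans = []
--     n = 2
--
--     while finalSum >= n:
--         if finalSum - n <= n:
--             ans.append(finalSum)
--             break
--         ans.append(n)
--         finalSum -= n
--         n += 2
--
--     return ans
-- ===== SOURCE B (Python) =====
-- def maximumEvenSplit(finalSum):
--     # closed-form construction: find the count k of terms, then build the k-term list directly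
--     if finalSum <= 0 or finalSum % 2 == 1:
--         return []
--     k = 0
--     while (k + 1) * (k + 2) <= finalSum:
--         k += 1
--     return [2 * i for i in range(1, k)] + [finalSum - k * (k - 1)]
-- ===== Notes on version B (the rewrite author's own statement) =====
-- stated objective: alternative
-- what changed: Replaces A's greedy subtract-and-append loop (with its inline terminal branch) by a count-then-construct closed form: find the term count k as the largest k with k*(k+1) <= finalSum, emit the first k-1 even numbers via a comprehension, and compute the last element arithmetically as finalSum - k*(k-1).
import Mathlib
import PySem

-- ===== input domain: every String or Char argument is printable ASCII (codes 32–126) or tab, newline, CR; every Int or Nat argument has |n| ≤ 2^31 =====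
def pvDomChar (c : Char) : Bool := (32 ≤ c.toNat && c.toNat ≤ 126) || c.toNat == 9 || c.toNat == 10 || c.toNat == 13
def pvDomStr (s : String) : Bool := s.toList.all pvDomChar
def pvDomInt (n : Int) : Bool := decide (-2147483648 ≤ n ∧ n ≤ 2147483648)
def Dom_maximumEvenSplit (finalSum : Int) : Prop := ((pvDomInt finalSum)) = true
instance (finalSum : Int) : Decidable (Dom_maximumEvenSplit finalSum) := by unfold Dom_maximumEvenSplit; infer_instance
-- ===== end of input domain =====

-- B replaces A's greedy subtract-and-append loop by a count-then-construct decomposition (alternative algorithm, same cost).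

-- ===== PORT A =====
-- A's while loop; the loop variable n starts at 2 and only ever grows by 2, so it is
-- carried as a Nat (its values coincide with Python's int n on every reachable state).
def pvALoop (finalSum : Int) (n : Nat) : List Int :=
  if finalSum >= (n : Int) then
    if finalSum - (n : Int) <= (n : Int) then [finalSum]
    else (n : Int) :: pvALoop (finalSum - (n : Int)) (n + 2)
  else []
termination_by (finalSum - (n : Int)).toNat
decreasing_by
  rename_i h1 h2
  omega

def maximumEvenSplit (finalSum : Int) : List Int :=
  if PySem.Int.mod finalSum 2 == 1 then [] else pvALoop finalSum 2

-- ===== PORT B =====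
-- B's k-search loop; k starts at 0 and grows by 1, carried as a Nat (same values as Python's k).
def pvFindK (finalSum : Int) (k : Nat) : Nat :=
  if ((k : Int) + 1) * ((k : Int) + 2) <= finalSum then pvFindK finalSum (k + 1) else k
termination_by finalSum.toNat - k
decreasing_by
  rename_i h
  have h2 : ((k : Int)) + 2 <= finalSum := by nlinarith [Int.natCast_nonneg k]
  omega

-- range(1, k) with k : Nat is List.range' 1 (k - 1) (both empty for k <= 1).
def maximumEvenSplit_alt (finalSum : Int) : List Int :=
  if finalSum <= 0 ∨ PySem.Int.mod finalSum 2 == 1 then []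
  else
    ((List.range' 1 (pvFindK finalSum 0 - 1)).map (fun i => 2 * (i : Int)))
      ++ [finalSum - (pvFindK finalSum 0 : Int) * ((pvFindK finalSum 0 : Int) - 1)]

-- ===== PRECONDITION & SPEC =====
def Spec_maximumEvenSplit (finalSum : Int) (out : List Int) : Prop := out = maximumEvenSplit_alt finalSum
instance (finalSum : Int) (out : List Int) : Decidable (Spec_maximumEvenSplit finalSum out) := by unfold Spec_maximumEvenSplit; infer_instance

-- ===== CLAIM (what is proved, stated in full; the proofs are below) =====
def Claim_equal_maximumEvenSplit : Prop := ∀ (finalSum : Int), Dom_maximumEvenSplit finalSum → Spec_maximumEvenSplit finalSum (maximumEvenSplit finalSum)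

-- ===== LEMMAS AND PROOFS =====

lemma pvFindK_ge (finalSum : Int) (k : Nat) : k ≤ pvFindK finalSum k := by
  refine pvFindK.induct finalSum (fun k => k ≤ pvFindK finalSum k) ?_ ?_ k
  · intro x h ih; rw [pvFindK]; simp only [if_pos h]; omega
  · intro x h; rw [pvFindK]; simp only [if_neg h]; exact le_rfl

lemma pvFindK_eq_of_le (finalSum : Int) (k : Nat)
    (h : ((k : Int) + 1) * ((k : Int) + 2) ≤ finalSum) :
    pvFindK finalSum k = pvFindK finalSum (k + 1) := by
  rw [pvFindK]; simp only [if_pos h]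

lemma pvFindK_eq_self (finalSum : Int) (k : Nat)
    (h : ¬ ((k : Int) + 1) * ((k : Int) + 2) ≤ finalSum) :
    pvFindK finalSum k = k := by
  rw [pvFindK]; simp only [if_neg h]

lemma pvALoop_eq (N : Nat) : forall (fs : Int) (j : Nat), fs.toNat <= N -> 1 <= j ->
    fs % 2 = 0 -> 2 * (j : Int) <= fs ->
    pvALoop fs (2 * j) =
      ((List.range' j (pvFindK (fs + (j : Int) * ((j : Int) - 1)) j - j)).map
          (fun i => 2 * (i : Int)))
        ++ [fs + (j : Int) * ((j : Int) - 1)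
              - (pvFindK (fs + (j : Int) * ((j : Int) - 1)) j : Int)
                * ((pvFindK (fs + (j : Int) * ((j : Int) - 1)) j : Int) - 1)] := by
  induction N with
  | zero =>
    intro fs j hN hj he hge
    exfalso; omega
  | succ N ih =>
    intro fs j hN hj he hge
    set F : Int := fs + (j : Int) * ((j : Int) - 1) with hF
    have hj1 : (1 : Int) <= (j : Int) := by exact_mod_cast hj
    by_cases hsmall : fs <= 4 * (j : Int)
    case pos =>
      have hK : pvFindK F j = j := by
        apply pvFindK_eq_self
        push Not
        nlinarith
      rw [pvALoop]
      have c1 : fs >= ((2 * j : Nat) : Int) := by push_cast; omega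
      have c2 : fs - ((2 * j : Nat) : Int) <= ((2 * j : Nat) : Int) := by push_cast; omega
      rw [if_pos c1, if_pos c2, hK]
      simp
      ring
    case neg =>
      push Not at hsmall
      have hfs : 4 * (j : Int) + 2 <= fs := by omega
      have hKstep : pvFindK F j = pvFindK F (j + 1) := by
        apply pvFindK_eq_of_le
        nlinarith
      have hrec := ih (fs - 2 * (j : Int)) (j + 1) (by omega) (by omega) (by omega) (by push_cast; omega)
      rw [pvALoop]
      have c1 : fs >= ((2 * j : Nat) : Int) := by push_cast; omega
      have c2 : ¬ (fs - ((2 * j : Nat) : Int) <= ((2 * j : Nat) : Int)) := by push_cast; omega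
      rw [if_pos c1, if_neg c2]
      have hn2 : 2 * j + 2 = 2 * (j + 1) := by ring
      have harg : fs - ((2 * j : Nat) : Int) = fs - 2 * (j : Int) := by push_cast; ring
      rw [hn2, harg, hrec]
      have hF' : fs - 2 * (j : Int) + ((j + 1 : Nat) : Int) * (((j + 1 : Nat) : Int) - 1) = F := by
        push_cast; ring
      rw [hF']
      rw [← hKstep]
      have hKge : j + 1 <= pvFindK F j := by
        rw [hKstep]; exact pvFindK_ge F (j+1)
      have hlen : pvFindK F j - j = (pvFindK F j - (j + 1)) + 1 := by omega
      rw [hlen, List.range'_succ]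
      simp

-- ===== VERDICT (by name: the statement is the Claim_ definition above) =====

theorem maximumEvenSplit_spec : Claim_equal_maximumEvenSplit := by
  intro fs _hdom
  unfold Spec_maximumEvenSplit maximumEvenSplit maximumEvenSplit_alt
  have hm : PySem.Int.mod fs 2 = fs % 2 := PySem.Int.mod_eq_emod_of_pos (by norm_num)
  by_cases hodd : fs % 2 = 1
  case pos => simp [hodd]
  case neg =>
    have he : fs % 2 = 0 := by omega
    have hbeq : (PySem.Int.mod fs 2 == 1) = false := by
      rw [hm, he]; decide
    simp only [hbeq, Bool.false_eq_true, if_false, or_false]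
    by_cases hpos : fs <= 0
    case pos =>
      rw [if_pos hpos, pvALoop]
      have hn : ¬ fs >= (((2 : Nat)) : Int) := by push_cast; omega
      rw [if_neg hn]
    case neg =>
      rw [if_neg hpos]
      push Not at hpos
      have h0 : pvFindK fs 0 = pvFindK fs 1 := by
        apply pvFindK_eq_of_le; push_cast; omega
      have hmain := pvALoop_eq fs.toNat fs 1 le_rfl le_rfl he (by push_cast; omega)
      have hF : fs + ((1 : Nat) : Int) * (((1 : Nat) : Int) - 1) = fs := by push_cast; ring
      rw [hF] at hmain
      have h21 : (2 : Nat) = 2 * 1 := rfl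
      rw [h21, hmain, h0]
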